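-- pv_equiv track=rewrite | github.com/pawgajda/codewars-solutions | python/find_cracker.py | find_hack
-- ===== SOURCE A (Python) =====
-- def sum_scores(grades):
--     courses = len(grades)
--     sum = 0
--     good_grades = 0
--
--     for grade in grades:
--         if grade == "A":
--             sum += 30
--             good_grades += 1
--         elif grade == "B":
--             sum += 20
--             good_grades += 1
--         elif grade == "C":
--             sum += 10
--         elif grade == "D":
--             sum += 5
--
--     # calculate bonus score
--     if courses >= 5 and courses == good_grades:
--         sum += 20
--
--     # return sum of all grades with bonus score
--     return sum
--
-- def find_hack(arr):
--     crackers = []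
--
--     for student in arr:
--         # unpack student array entry
--         student_name = student[0]
--         student_score = student[1]
--         student_grades = student[2]
--
--         # calculate sum of all student's grades
--         score_sum = sum_scores(student_grades)
--
--         if student_score > 200:
--             crackers.append(student_name)
--         elif student_score > score_sum:
--             crackers.append(student_name)
--
--     return crackers
-- ===== SOURCE B (Python) =====
-- def sum_scores(grades):
--     a = grades.count("A")
--     b = grades.count("B")
--     total = 30 * a + 20 * b + 10 * grades.count("C") + 5 * grades.count("D")
--     if len(grades) >= 5 and len(grades) == a + b:
--         total += 20
--     return total
--
-- def find_hack(arr):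
--     return [s[0] for s in arr if s[1] > 200 or s[1] > sum_scores(s[2])]
-- ===== Notes on version B (the rewrite author's own statement) =====
-- stated objective: idiomatic
-- what changed: sum_scores's per-element if/elif accumulator loop is replaced by four .count calls combined in one closed-form weighted expression (good grades = countA+countB), and find_hack's append loop with two branches becomes a single list comprehension with 'score > 200 or score > sum'.
import Mathlib
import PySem

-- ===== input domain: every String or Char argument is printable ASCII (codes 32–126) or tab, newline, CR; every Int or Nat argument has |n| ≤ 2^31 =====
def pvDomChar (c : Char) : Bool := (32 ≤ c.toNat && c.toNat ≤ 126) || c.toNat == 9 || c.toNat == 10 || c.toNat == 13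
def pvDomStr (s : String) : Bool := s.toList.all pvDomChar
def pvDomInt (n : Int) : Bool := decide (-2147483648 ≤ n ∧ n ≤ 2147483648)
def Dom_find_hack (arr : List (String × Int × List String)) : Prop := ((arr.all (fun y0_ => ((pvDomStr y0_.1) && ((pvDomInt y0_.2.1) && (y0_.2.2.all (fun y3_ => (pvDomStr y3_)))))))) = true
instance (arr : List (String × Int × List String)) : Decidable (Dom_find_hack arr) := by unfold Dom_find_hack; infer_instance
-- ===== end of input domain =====

-- B replaces A's if/elif accumulator loop by count-then-arithmetic and the append loop by a comprehension (idiomatic; same cost).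

-- ===== PORT A =====
-- literal port of sum_scores: one pass keeping (sum, good_grades)
def sumScoresA (grades : List String) : Int :=
  let courses : Int := grades.length
  let p := grades.foldl (fun (acc : Int × Int) grade =>
    if grade == "A" then (acc.1 + 30, acc.2 + 1)
    else if grade == "B" then (acc.1 + 20, acc.2 + 1)
    else if grade == "C" then (acc.1 + 10, acc.2)
    else if grade == "D" then (acc.1 + 5, acc.2)
    else acc) (0, 0)
  if courses ≥ 5 ∧ courses = p.2 then p.1 + 20 else p.1

def find_hack (arr : List (String × Int × List String)) : List String :=
  arr.foldl (fun crackers student =>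
    let student_name := student.1
    let student_score := student.2.1
    let student_grades := student.2.2
    let score_sum := sumScoresA student_grades
    if student_score > 200 then crackers ++ [student_name]
    else if student_score > score_sum then crackers ++ [student_name]
    else crackers) []

-- ===== PORT B =====
-- count-based closed form: total = 30A + 20B + 10C + 5D, good grades = A + B
def sumScoresB (grades : List String) : Int :=
  let a : Int := grades.count "A"
  let b : Int := grades.count "B"
  let total := 30 * a + 20 * b + 10 * (grades.count "C" : Int) + 5 * (grades.count "D" : Int)
  if grades.length ≥ 5 ∧ (grades.length : Int) = a + b then total + 20 else total

def find_hack_alt (arr : List (String × Int × List String)) : List String :=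
  (arr.filter (fun s => s.2.1 > 200 || s.2.1 > sumScoresB s.2.2)).map (·.1)

-- ===== PRECONDITION & SPEC =====
def Spec_find_hack (arr : List (String × Int × List String)) (out : List String) : Prop := out = find_hack_alt arr
instance (arr : List (String × Int × List String)) (out : List String) : Decidable (Spec_find_hack arr out) := by unfold Spec_find_hack; infer_instance

-- ===== CLAIM (what is proved, stated in full; the proofs are below) =====
def Claim_equal_find_hack : Prop := ∀ (arr : List (String × Int × List String)), Dom_find_hack arr → Spec_find_hack arr (find_hack arr)

-- ===== LEMMAS AND PROOFS =====
theorem sumScoresA_fold (grades : List String) (s g : Int) :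
    grades.foldl (fun (acc : Int × Int) grade =>
      if grade == "A" then (acc.1 + 30, acc.2 + 1)
      else if grade == "B" then (acc.1 + 20, acc.2 + 1)
      else if grade == "C" then (acc.1 + 10, acc.2)
      else if grade == "D" then (acc.1 + 5, acc.2)
      else acc) (s, g)
    = (s + 30 * grades.count "A" + 20 * grades.count "B" + 10 * grades.count "C" + 5 * grades.count "D",
       g + grades.count "A" + grades.count "B") := by
  induction grades generalizing s g with
  | nil => simp
  | cons x xs ih =>
    simp only [List.foldl_cons, List.count_cons]
    by_cases hA : x = "A" <;> by_cases hB : x = "B" <;> by_cases hC : x = "C" <;>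
      by_cases hD : x = "D" <;> simp_all [ih, Prod.ext_iff] <;> push_cast <;> omega

theorem sumScores_eq (grades : List String) : sumScoresA grades = sumScoresB grades := by
  unfold sumScoresA sumScoresB
  rw [sumScoresA_fold]
  simp only [zero_add]
  split_ifs with h1 h2 h2 <;> first | rfl | (exfalso; omega)

theorem find_hack_fold (arr : List (String × Int × List String)) (acc : List String) :
    arr.foldl (fun crackers student =>
      let student_name := student.1
      let student_score := student.2.1
      let student_grades := student.2.2
      let score_sum := sumScoresA student_grades
      if student_score > 200 then crackers ++ [student_name]
      else if student_score > score_sum then crackers ++ [student_name]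
      else crackers) acc
    = acc ++ (arr.filter (fun s => s.2.1 > 200 || s.2.1 > sumScoresB s.2.2)).map (·.1) := by
  induction arr generalizing acc with
  | nil => simp
  | cons x xs ih =>
    simp only [List.foldl_cons, List.filter_cons]
    by_cases h1 : 200 < x.2.1
    · simp only [h1, if_pos, gt_iff_lt, decide_true, Bool.true_or, ih]
      simp
    · by_cases h2 : sumScoresB x.2.2 < x.2.1
      · rw [if_neg (by simpa using h1), if_pos (by simpa [sumScores_eq] using h2), ih]
        simp [h1, h2]
      · rw [if_neg (by simpa using h1), if_neg (by simpa [sumScores_eq] using h2), ih]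
        simp [h1, h2]

-- ===== VERDICT (by name: the statement is the Claim_ definition above) =====
theorem find_hack_spec : Claim_equal_find_hack := by
  intro arr _
  show find_hack arr = find_hack_alt arr
  unfold find_hack find_hack_alt
  rw [find_hack_fold]
  simp
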